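-- pv_equiv track=rewrite | github.com/apaku/aoc2018 | puzzle20/puzzle20.py | parse
-- ===== SOURCE A (Python) =====
-- def parse(idx, data):
--     paths = []
--     datalen = len(data)
--     buf = ""
--     curalternativepaths = [""]
--     while idx < datalen:
--         c = data[idx]
--         if c == '|':
--             if len(buf) > 0:
--                 for i in range(len(curalternativepaths)):
--                     curalternativepaths[i] += buf
--             buf = ""
--             paths += curalternativepaths
--             curalternativepaths = [""]
--         elif c == '(':
--             if len(buf) > 0:
--                 for i in range(len(curalternativepaths)):
--                     curalternativepaths[i] += buf
--             buf = ""
--             (nextidx, subpaths) = parse(idx + 1, data)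
--             newcuralternativepaths = []
--             for p in curalternativepaths:
--                 for sp in subpaths:
--                     newcuralternativepaths.append(p + sp)
--             curalternativepaths = newcuralternativepaths
--             idx = nextidx
--             continue
--         elif c == ')':
--             if len(buf) > 0:
--                 for i in range(len(curalternativepaths)):
--                     curalternativepaths[i] += buf
--             buf = ""
--             if len(curalternativepaths) > 0:
--                 paths += curalternativepaths
--             return (idx + 1, paths)
--         else:
--             buf += c
--         idx += 1
--     if len(buf) > 0:
--         for i in range(len(curalternativepaths)):
--             curalternativepaths[i] += buf
--     buf = ""
--     if len(curalternativepaths) > 0: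
--         paths += curalternativepaths
--     return (idx, paths)
-- ===== SOURCE B (Python) =====
-- # Recursive-descent re-implementation: grammar alternation/sequence instead of
-- # A's single buffered while-loop with explicit (paths, buf, cur) state. Same
-- # return values; objective: simpler decomposition (not claimed faster).
--
-- def parse(idx, data):
--     j, alts = _alternation(idx, data)
--     if j < len(data) and data[j] == ')':
--         return (j + 1, alts)
--     return (j, alts)
--
-- def _alternation(idx, data):
--     j, seq = _sequence(idx, data)
--     if j < len(data) and data[j] == '|':
--         j2, rest = _alternation(j + 1, data)
--         return (j2, seq + rest)
--     return (j, seq)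
--
-- def _sequence(idx, data):
--     result = [""]
--     while idx < len(data):
--         c = data[idx]
--         if c == '|' or c == ')':
--             break
--         if c == '(':
--             idx, sub = parse(idx + 1, data)
--             result = [r + s for r in result for s in sub]
--         else:
--             result = [r + c for r in result]
--             idx += 1
--     return (idx, result)
-- ===== Notes on version B (the rewrite author's own statement) =====
-- stated objective: simpler
-- what changed: A's single buffered while-loop carrying (paths, buf, curalternativepaths) state is replaced by a three-function recursive-descent grammar (parse / _alternation / _sequence) that splits on '|' and recurses on '(' with no buffer or pending-paths state.
import Mathlib
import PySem

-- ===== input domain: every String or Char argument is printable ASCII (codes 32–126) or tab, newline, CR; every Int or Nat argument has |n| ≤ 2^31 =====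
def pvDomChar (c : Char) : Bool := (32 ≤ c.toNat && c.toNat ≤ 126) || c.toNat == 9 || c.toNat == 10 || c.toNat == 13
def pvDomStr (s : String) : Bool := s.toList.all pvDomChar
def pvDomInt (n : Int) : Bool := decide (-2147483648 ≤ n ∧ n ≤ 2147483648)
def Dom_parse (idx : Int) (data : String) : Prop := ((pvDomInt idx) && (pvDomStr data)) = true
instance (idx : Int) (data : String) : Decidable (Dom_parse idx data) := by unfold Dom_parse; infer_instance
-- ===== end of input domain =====

-- B re-implements A's single buffered while-loop as a recursive-descent grammar
-- (alternation / sequence); same return value (index and path list, element for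
-- element) on every input satisfying Pre_parse; objective: simpler decomposition.

-- ===== PORT A =====
-- [p + sp for p in xs for sp in ys] (used by both ports for their cross products)
def pvCross (xs ys : List String) : List String := xs.flatMap (fun p => ys.map (fun sp => p ++ sp))

-- A's "if len(buf) > 0: for i in range(len(cur)): cur[i] += buf"
def pvFlushA (buf : String) (cur : List String) : List String :=
  if PySem.Str.len buf > 0 then cur.map (fun p => p ++ buf) else cur

-- A's while-loop over the state (idx, paths, buf, curalternativepaths), as a
-- fueled recursion; none = fuel ran out or IndexError (data[idx] with idx < -len):
-- neither is reached under Pre_parse with the fuel `parse` supplies.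
def parseAF (fuel : Nat) (idx : Int) (data : String) (paths : List String)
    (buf : String) (cur : List String) : Option (Int × List String) :=
  match fuel with
  | 0 => none
  | fuel + 1 =>
    if idx < PySem.Str.len data then
      match PySem.Str.pyGet? data idx with
      | none => none
      | some c =>
        if c = '|' then
          parseAF fuel (idx + 1) data (paths ++ pvFlushA buf cur) "" [""]
        else if c = '(' then
          match parseAF fuel (idx + 1) data [] "" [""] with
          | none => none
          | some (nextidx, subpaths) =>
            parseAF fuel nextidx data paths "" (pvCross (pvFlushA buf cur) subpaths)
        else if c = ')' then
          some (idx + 1,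
            if (pvFlushA buf cur).length > 0 then paths ++ pvFlushA buf cur else paths)
        else
          parseAF fuel (idx + 1) data paths (buf.push c) cur
    else
      some (idx,
        if (pvFlushA buf cur).length > 0 then paths ++ pvFlushA buf cur else paths)

def parse (idx : Int) (data : String) : Int × List String :=
  match parseAF ((PySem.Str.len data - idx).toNat + 1) idx data [] "" [""] with
  | some r => r
  | none => (idx, [])   -- unreachable under Pre_parse (the fuel is sufficient, proved below)

-- ===== PORT B =====
-- Source B: parse / _alternation / _sequence (the while loops become fueled recursion;
-- none = fuel ran out or IndexError, unreachable under Pre_parse with this fuel).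
mutual
  -- Source B parse: one alternation, then consume a closing ')' if present
  def parseTopB (fuel : Nat) (idx : Int) (data : String) : Option (Int × List String) :=
    match parseAltnB fuel idx data with
    | none => none
    | some (j, alts) =>
      if j < PySem.Str.len data ∧ PySem.Str.pyGet? data j = some ')' then some (j + 1, alts)
      else some (j, alts)
  termination_by (fuel, 2)

  -- Source B _alternation: sequences separated by '|', path lists concatenated in order
  def parseAltnB (fuel : Nat) (idx : Int) (data : String) : Option (Int × List String) :=
    match fuel with
    | 0 => none
    | fuel + 1 =>
      match parseSeqB (fuel + 1) idx data [""] with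
      | none => none
      | some (j, seqPaths) =>
        if j < PySem.Str.len data ∧ PySem.Str.pyGet? data j = some '|' then
          match parseAltnB fuel (j + 1) data with
          | none => none
          | some (j2, rest) => some (j2, seqPaths ++ rest)
        else some (j, seqPaths)
  termination_by (fuel, 1)

  -- Source B _sequence: literals extend every alternative, '(' recurses into parse
  def parseSeqB (fuel : Nat) (idx : Int) (data : String) (result : List String) :
      Option (Int × List String) :=
    match fuel with
    | 0 => none
    | fuel + 1 =>
      if idx < PySem.Str.len data then
        match PySem.Str.pyGet? data idx with
        | none => none
        | some c =>
          if c = '|' ∨ c = ')' then some (idx, result)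
          else if c = '(' then
            match parseTopB fuel (idx + 1) data with
            | none => none
            | some (n, sub) => parseSeqB fuel n data (pvCross result sub)
          else parseSeqB fuel (idx + 1) data (result.map (fun r => r ++ c.toString))
      else some (idx, result)
  termination_by (fuel, 0)
end

def parse_alt (idx : Int) (data : String) : Int × List String :=
  match parseTopB ((PySem.Str.len data - idx).toNat + 1) idx data with
  | some r => r
  | none => (idx, [])   -- unreachable under Pre_parse (the fuel is sufficient, proved below)

-- ===== PRECONDITION & SPEC =====
-- Pre_parse excludes exactly the inputs where A raises IndexError: idx < -len(data)
-- makes the first data[idx] access go out of range (Python negative indexing).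
def Pre_parse (idx : Int) (data : String) : Prop := -(PySem.Str.len data) ≤ idx
instance (idx : Int) (data : String) : Decidable (Pre_parse idx data) := by
  unfold Pre_parse; infer_instance

def pvWitness_parse : Int × String := (0, "a(b|c)d|x")

def Spec_parse (idx : Int) (data : String) (out : Int × List String) : Prop := out = parse_alt idx data
instance (idx : Int) (data : String) (out : Int × List String) : Decidable (Spec_parse idx data out) := by unfold Spec_parse; infer_instance

-- ===== CLAIM (what is proved, stated in full; the proofs are below) =====
def Claim_equal_parse : Prop := ∀ (idx : Int) (data : String), Dom_parse idx data → Pre_parse idx data → Spec_parse idx data (parse idx data)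

-- ===== LEMMAS AND PROOFS =====

-- _alternation with the first sequence's accumulator generalised from [""] to `init`
-- (proof-side only: it packages A's loop state (buf, cur) as the seed of B's first sequence).
def altG (fuel : Nat) (idx : Int) (data : String) (init : List String) :
    Option (Int × List String) :=
  match fuel with
  | 0 => none
  | fuel + 1 =>
    match parseSeqB (fuel + 1) idx data init with
    | none => none
    | some (j, seqPaths) =>
      if j < PySem.Str.len data ∧ PySem.Str.pyGet? data j = some '|' then
        match altG fuel (j + 1) data [""] with
        | none => none
        | some (j2, rest) => some (j2, seqPaths ++ rest)
      else some (j, seqPaths)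

theorem guard_append (p l : List String) :
    (if l.length > 0 then p ++ l else p) = p ++ l := by
  cases l <;> simp

theorem pyGetSome (data : String) (idx : Int) (h1 : -(PySem.Str.len data) ≤ idx)
    (h2 : idx < PySem.Str.len data) : ∃ c, PySem.Str.pyGet? data idx = some c := by
  rw [PySem.Str.len_eq] at h1 h2
  cases hg : PySem.List.pyGet? data.toList idx with
  | none =>
    exfalso
    rw [PySem.List.pyGet?_eq_none_iff] at hg
    exact hg (by unfold PySem.Raise.InRange; omega)
  | some c => exact ⟨c, by simp [hg]⟩

theorem altG_empty (fuel : Nat) (idx : Int) (data : String) :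
    altG fuel idx data [""] = parseAltnB fuel idx data := by
  induction fuel generalizing idx with
  | zero => simp [altG, parseAltnB]
  | succ f ih =>
    simp only [altG, parseAltnB, ih]

-- fuel monotonicity (success is preserved by one more unit of fuel)
theorem monoB (fuel : Nat) :
    (∀ idx data res r, parseSeqB fuel idx data res = some r → parseSeqB (fuel + 1) idx data res = some r) ∧
    (∀ idx data r, parseAltnB fuel idx data = some r → parseAltnB (fuel + 1) idx data = some r) ∧
    (∀ idx data r, parseTopB fuel idx data = some r → parseTopB (fuel + 1) idx data = some r) := by
  induction fuel with
  | zero =>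
    refine ⟨?_, ?_, ?_⟩ <;> intro idx data
    · intro res r h; simp [parseSeqB] at h
    · intro r h; simp [parseAltnB] at h
    · intro r h; simp [parseTopB, parseAltnB] at h
  | succ f ih =>
    obtain ⟨ihs, iha, iht⟩ := ih
    have hseq : ∀ idx data res r, parseSeqB (f + 1) idx data res = some r →
        parseSeqB (f + 1 + 1) idx data res = some r := by
      intro idx data res r h
      rw [parseSeqB] at h ⊢
      by_cases hlt : idx < PySem.Str.len data
      · rw [if_pos hlt] at h ⊢
        cases hg : PySem.Str.pyGet? data idx with
        | none => rw [hg] at h; simp at h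
        | some c =>
          rw [hg] at h
          dsimp only at h ⊢
          by_cases h1 : c = '|' ∨ c = ')'
          · rw [if_pos h1] at h ⊢; exact h
          · rw [if_neg h1] at h ⊢
            by_cases h2 : c = '('
            · rw [if_pos h2] at h ⊢
              cases ht : parseTopB f (idx + 1) data with
              | none => rw [ht] at h; simp at h
              | some s =>
                obtain ⟨n, sub⟩ := s
                rw [ht] at h
                rw [iht _ _ _ ht]
                dsimp only at h ⊢
                exact ihs _ _ _ _ h
            · rw [if_neg h2] at h ⊢
              exact ihs _ _ _ _ h
      · rw [if_neg hlt] at h ⊢; exact h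
    have halt : ∀ idx data r, parseAltnB (f + 1) idx data = some r →
        parseAltnB (f + 1 + 1) idx data = some r := by
      intro idx data r h
      rw [parseAltnB] at h ⊢
      cases hs : parseSeqB (f + 1) idx data [""] with
      | none => rw [hs] at h; simp at h
      | some s =>
        obtain ⟨j, ss⟩ := s
        rw [hs] at h
        rw [hseq _ _ _ _ hs]
        dsimp only at h ⊢
        by_cases hb : j < PySem.Str.len data ∧ PySem.Str.pyGet? data j = some '|'
        · rw [if_pos hb] at h ⊢
          cases ha : parseAltnB f (j + 1) data with
          | none => rw [ha] at h; simp at h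
          | some s2 =>
            rw [ha] at h
            rw [iha _ _ _ ha]
            exact h
        · rw [if_neg hb] at h ⊢; exact h
    refine ⟨hseq, halt, ?_⟩
    intro idx data r h
    rw [parseTopB] at h ⊢
    cases ha : parseAltnB (f + 1) idx data with
    | none => rw [ha] at h; simp at h
    | some s =>
      obtain ⟨j, alts⟩ := s
      rw [ha] at h
      rw [halt _ _ _ ha]
      exact h

theorem monoAltG (fuel : Nat) (idx : Int) (data : String) (init : List String) (r : Int × List String)
    (h : altG fuel idx data init = some r) : altG (fuel + 1) idx data init = some r := by
  induction fuel generalizing idx init r with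
  | zero => simp [altG] at h
  | succ f ih =>
    rw [altG] at h ⊢
    cases hs : parseSeqB (f + 1) idx data init with
    | none => rw [hs] at h; simp at h
    | some s =>
      obtain ⟨j, ss⟩ := s
      rw [hs] at h
      rw [(monoB (f + 1)).1 _ _ _ _ hs]
      dsimp only at h ⊢
      by_cases hb : j < PySem.Str.len data ∧ PySem.Str.pyGet? data j = some '|'
      · rw [if_pos hb] at h ⊢
        cases ha : altG f (j + 1) data [""] with
        | none => rw [ha] at h; simp at h
        | some s2 =>
          rw [ha] at h
          rw [ih _ _ _ ha]
          exact h
      · rw [if_neg hb] at h ⊢; exact h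

-- A's returned index never moves left; it moves strictly right past any scanned char
theorem idxBoundA (fuel : Nat) (idx : Int) (data : String) (paths : List String)
    (buf : String) (cur : List String) (j : Int) (out : List String)
    (h : parseAF fuel idx data paths buf cur = some (j, out)) :
    idx ≤ j ∧ (idx < PySem.Str.len data → idx + 1 ≤ j) := by
  induction fuel generalizing idx paths buf cur j out with
  | zero => simp [parseAF] at h
  | succ f ih =>
    rw [parseAF] at h
    by_cases hlt : idx < PySem.Str.len data
    · rw [if_pos hlt] at h
      cases hg : PySem.Str.pyGet? data idx with
      | none => rw [hg] at h; simp at h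
      | some c =>
        rw [hg] at h
        dsimp only at h
        by_cases h1 : c = '|'
        · rw [if_pos h1] at h
          have := ih _ _ _ _ _ _ h
          omega
        · rw [if_neg h1] at h
          by_cases h2 : c = '('
          · rw [if_pos h2] at h
            cases hin : parseAF f (idx + 1) data [] "" [""] with
            | none => rw [hin] at h; simp at h
            | some s =>
              obtain ⟨nextidx, sub⟩ := s
              rw [hin] at h
              dsimp only at h
              have h3 := ih _ _ _ _ _ _ hin
              have h4 := ih _ _ _ _ _ _ h
              omega
          · rw [if_neg h2] at h
            by_cases h3 : c = ')'
            · rw [if_pos h3] at h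
              simp only [Option.some.injEq, Prod.mk.injEq] at h
              omega
            · rw [if_neg h3] at h
              have := ih _ _ _ _ _ _ h
              omega
    · rw [if_neg hlt] at h
      simp only [Option.some.injEq, Prod.mk.injEq] at h
      omega

-- with idx ≥ -len and fuel ≥ len - idx + 1, A's loop terminates with a value
theorem sufA (fuel : Nat) :
    ∀ (idx : Int) (data : String) (paths : List String) (buf : String) (cur : List String),
    -(PySem.Str.len data) ≤ idx → (PySem.Str.len data - idx).toNat + 1 ≤ fuel →
    (parseAF fuel idx data paths buf cur).isSome := by
  induction fuel with
  | zero => intro idx data paths buf cur _ hf; omega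
  | succ f ih =>
    intro idx data paths buf cur hpre hf
    rw [parseAF]
    by_cases hlt : idx < PySem.Str.len data
    · rw [if_pos hlt]
      obtain ⟨c, hg⟩ := pyGetSome data idx hpre hlt
      rw [hg]
      dsimp only
      by_cases h1 : c = '|'
      · rw [if_pos h1]
        exact ih _ _ _ _ _ (by omega) (by omega)
      · rw [if_neg h1]
        by_cases h2 : c = '('
        · rw [if_pos h2]
          have hin := ih (idx + 1) data [] "" [""] (by omega) (by omega)
          obtain ⟨s, hs⟩ := Option.isSome_iff_exists.mp hin
          obtain ⟨nextidx, sub⟩ := s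
          rw [hs]
          dsimp only
          have hb := idxBoundA f (idx + 1) data [] "" [""] nextidx sub hs
          exact ih _ _ _ _ _ (by omega) (by omega)
        · rw [if_neg h2]
          by_cases h3 : c = ')'
          · rw [if_pos h3]; simp
          · rw [if_neg h3]
            exact ih _ _ _ _ _ (by omega) (by omega)
    · rw [if_neg hlt]; simp

-- flushing the buffer commutes with pushing one more character
theorem flush_push (buf : String) (c : Char) (cur : List String) :
    pvFlushA (buf.push c) cur = (pvFlushA buf cur).map (fun r => r ++ c.toString) := by
  unfold pvFlushA
  have hp : PySem.Str.len (buf.push c) > 0 := by simp [PySem.Str.len_eq]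
  rw [if_pos hp]
  by_cases h : PySem.Str.len buf > 0
  · rw [if_pos h]
    simp only [List.map_map]
    apply List.map_congr_left
    intro p _
    show p ++ buf.push c = (p ++ buf) ++ c.toString
    apply String.ext; simp
  · rw [if_neg h]
    have hb : buf = "" := by
      apply String.ext
      have h1 := PySem.Str.len_eq buf
      have h3 : buf.toList = [] := by
        cases hx : buf.toList with
        | nil => rfl
        | cons a l => rw [hx] at h1; rw [h1] at h; simp at h
      simp [h3]
    subst hb
    apply List.map_congr_left
    intro p _
    apply String.ext; simp

theorem flush_empty (cur : List String) : pvFlushA "" cur = cur := by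
  simp [pvFlushA]

-- a completed generalised alternation absorbs one preceding sequence step
theorem altG_absorb (f : Nat) (idx idx' : Int) (data : String) (init init' : List String)
    (j : Int) (alts : List String)
    (hstep : parseSeqB (f + 1) idx data init = parseSeqB f idx' data init')
    (h : altG f idx' data init' = some (j, alts)) :
    altG (f + 1) idx data init = some (j, alts) := by
  cases f with
  | zero => simp [altG] at h
  | succ g =>
    rw [altG] at h
    rw [altG]
    rw [hstep]
    cases hs : parseSeqB (g + 1) idx' data init' with
    | none => rw [hs] at h; simp at h
    | some s =>
      obtain ⟨j1, ss⟩ := s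
      rw [hs] at h
      dsimp only at h ⊢
      by_cases hb : j1 < PySem.Str.len data ∧ PySem.Str.pyGet? data j1 = some '|'
      · rw [if_pos hb] at h ⊢
        cases ha : altG g (j1 + 1) data [""] with
        | none => rw [ha] at h; simp at h
        | some s2 =>
          rw [ha] at h
          rw [monoAltG _ _ _ _ _ ha]
          exact h
      · rw [if_neg hb] at h ⊢; exact h

-- MAIN correspondence: one run of A's loop = one alternation of B seeded with A's
-- pending alternatives, followed by B's ')' consumption, with `paths` prepended.
theorem mainAB (fuel : Nat) :
    ∀ (idx : Int) (data : String) (paths : List String) (buf : String) (cur : List String)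
      (r : Int × List String),
    parseAF fuel idx data paths buf cur = some r →
    ∃ j alts, altG fuel idx data (pvFlushA buf cur) = some (j, alts) ∧
      r = if j < PySem.Str.len data ∧ PySem.Str.pyGet? data j = some ')' then
            ((j + 1 : Int), paths ++ alts)
          else (j, paths ++ alts) := by
  induction fuel with
  | zero => intro idx data paths buf cur r h; simp [parseAF] at h
  | succ f ih =>
    intro idx data paths buf cur r h
    rw [parseAF] at h
    by_cases hlt : idx < PySem.Str.len data
    · rw [if_pos hlt] at h
      cases hg : PySem.Str.pyGet? data idx with
      | none => rw [hg] at h; simp at h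
      | some c =>
        rw [hg] at h
        dsimp only at h
        by_cases h1 : c = '|'
        · -- '|' : flush, emit the pending alternatives, restart with [""]
          rw [if_pos h1] at h
          obtain ⟨j, alts, hA, hr⟩ := ih _ _ _ _ _ _ h
          rw [flush_empty] at hA
          refine ⟨j, pvFlushA buf cur ++ alts, ?_, ?_⟩
          · rw [altG]
            have hseq : parseSeqB (f + 1) idx data (pvFlushA buf cur) =
                some (idx, pvFlushA buf cur) := by
              rw [parseSeqB, if_pos hlt, hg]
              dsimp only
              rw [if_pos (Or.inl h1)]
            rw [hseq]
            dsimp only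
            rw [if_pos ⟨hlt, by rw [hg, h1]⟩, hA]
          · rw [hr]
            split <;> simp [List.append_assoc]
        · rw [if_neg h1] at h
          by_cases h2 : c = '('
          · -- '(' : recurse, cross the pending alternatives with the subpaths
            rw [if_pos h2] at h
            cases hin : parseAF f (idx + 1) data [] "" [""] with
            | none => rw [hin] at h; simp at h
            | some s =>
              obtain ⟨nextidx, sub⟩ := s
              rw [hin] at h
              dsimp only at h
              obtain ⟨m, alts0, hA0, hr0⟩ := ih _ _ _ _ _ _ hin
              rw [flush_empty] at hA0
              simp only [List.nil_append] at hr0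
              have htop : parseTopB f (idx + 1) data = some (nextidx, sub) := by
                rw [parseTopB]
                rw [altG_empty] at hA0
                rw [hA0]
                dsimp only
                by_cases hcm : m < PySem.Str.len data ∧ PySem.Str.pyGet? data m = some ')'
                · rw [if_pos hcm] at hr0 ⊢; rw [hr0]
                · rw [if_neg hcm] at hr0 ⊢; rw [hr0]
              obtain ⟨j, alts, hA1, hr1⟩ := ih _ _ _ _ _ _ h
              rw [flush_empty] at hA1
              refine ⟨j, alts, ?_, hr1⟩
              refine altG_absorb f idx nextidx data (pvFlushA buf cur)
                (pvCross (pvFlushA buf cur) sub) j alts ?_ hA1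
              rw [parseSeqB, if_pos hlt, hg]
              dsimp only
              rw [if_neg (by simp [h2]), if_pos h2, htop]
          · rw [if_neg h2] at h
            by_cases h3 : c = ')'
            · -- ')' : emit the pending alternatives and return past the ')'
              rw [if_pos h3] at h
              refine ⟨idx, pvFlushA buf cur, ?_, ?_⟩
              · rw [altG]
                have hseq : parseSeqB (f + 1) idx data (pvFlushA buf cur) =
                    some (idx, pvFlushA buf cur) := by
                  rw [parseSeqB, if_pos hlt, hg]
                  dsimp only
                  rw [if_pos (Or.inr h3)]
                rw [hseq]
                dsimp only
                rw [if_neg (by intro hx; rw [hg] at hx; simp [h3] at hx)]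
              · rw [if_pos ⟨hlt, by rw [hg, h3]⟩]
                simp only [Option.some.injEq] at h
                rw [← h, guard_append]
            · -- literal character: push it onto the buffer
              rw [if_neg h3] at h
              obtain ⟨j, alts, hA, hr⟩ := ih _ _ _ _ _ _ h
              rw [flush_push] at hA
              refine ⟨j, alts, ?_, hr⟩
              refine altG_absorb f idx (idx + 1) data (pvFlushA buf cur)
                ((pvFlushA buf cur).map (fun r => r ++ c.toString)) j alts ?_ hA
              rw [parseSeqB, if_pos hlt, hg]
              dsimp only
              rw [if_neg (by simp [h1, h3]), if_neg h2]
    · -- end of data: emit the pending alternatives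
      rw [if_neg hlt] at h
      simp only [Option.some.injEq] at h
      refine ⟨idx, pvFlushA buf cur, ?_, ?_⟩
      · rw [altG]
        have hseq : parseSeqB (f + 1) idx data (pvFlushA buf cur) =
            some (idx, pvFlushA buf cur) := by
          rw [parseSeqB, if_neg hlt]
        rw [hseq]
        dsimp only
        rw [if_neg (by intro hx; exact hlt hx.1)]
      · rw [if_neg (by intro hx; exact hlt hx.1)]
        rw [← h, guard_append]

-- ===== VERDICT (by name: the statement is the Claim_ definition above) =====
theorem parse_spec : Claim_equal_parse := by
  intro idx data _hdom hpre
  unfold Spec_parse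
  have hs := sufA ((PySem.Str.len data - idx).toNat + 1) idx data [] "" [""] hpre (le_refl _)
  obtain ⟨r, hr⟩ := Option.isSome_iff_exists.mp hs
  obtain ⟨j, alts, hA, hval⟩ :=
    mainAB ((PySem.Str.len data - idx).toNat + 1) idx data [] "" [""] r hr
  rw [flush_empty, altG_empty] at hA
  have hparse : parse idx data = r := by
    rw [parse, hr]
  have htop : parseTopB ((PySem.Str.len data - idx).toNat + 1) idx data = some r := by
    rw [parseTopB, hA]
    dsimp only
    by_cases hc : j < PySem.Str.len data ∧ PySem.Str.pyGet? data j = some ')'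
    · rw [if_pos hc] at hval ⊢; rw [hval]; simp
    · rw [if_neg hc] at hval ⊢; rw [hval]; simp
  rw [hparse, parse_alt, htop]
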